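-- pv_equiv track=rewrite | github.com/tuannx/arcade-agent | scripts/compare_baseline.py | _common_prefix_parts
-- ===== SOURCE A (Python) =====
-- def _common_prefix_parts(parts_list: list[list[str]]) -> list[str]:
--     """Compute the common prefix shared across entity token lists."""
--     if not parts_list:
--         return []
--     prefix: list[str] = []
--     for segments in zip(*parts_list):
--         if len(set(segments)) == 1:
--             prefix.append(segments[0])
--         else:
--             break
--     return prefix
-- ===== SOURCE B (Python) =====
-- def _common_two(xs, ys):
--     res = []
--     for x, y in zip(xs, ys):
--         if x != y:
--             break
--         res.append(x)
--     return res
--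
--
-- def _common_prefix_parts(parts_list: list[list[str]]) -> list[str]:
--     """Compute the common prefix shared across entity token lists."""
--     if not parts_list:
--         return []
--     prefix = list(parts_list[0])
--     for other in parts_list[1:]:
--         prefix = _common_two(prefix, other)
--     return prefix
-- ===== Notes on version B (the rewrite author's own statement) =====
-- stated objective: alternative
-- what changed: Replaced the columnar zip(*lists)+set scan with a pairwise fold: the first list is the running prefix and each remaining list shortens it via a two-list first-mismatch walk.
import Mathlib
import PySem

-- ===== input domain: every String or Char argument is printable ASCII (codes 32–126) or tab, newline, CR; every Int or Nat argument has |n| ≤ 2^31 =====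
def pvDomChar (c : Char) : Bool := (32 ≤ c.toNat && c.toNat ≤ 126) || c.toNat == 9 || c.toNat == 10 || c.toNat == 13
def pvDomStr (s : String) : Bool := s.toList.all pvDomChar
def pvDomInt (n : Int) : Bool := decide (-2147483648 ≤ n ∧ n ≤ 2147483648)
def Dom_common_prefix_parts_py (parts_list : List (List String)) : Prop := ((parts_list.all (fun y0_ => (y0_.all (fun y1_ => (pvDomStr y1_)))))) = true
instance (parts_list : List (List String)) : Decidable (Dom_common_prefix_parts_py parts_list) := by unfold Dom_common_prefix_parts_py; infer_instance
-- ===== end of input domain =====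

-- B replaces A's columnar zip(*lists)+set scan by a pairwise fold (two-list first-mismatch walk); alternative decomposition, same cost.

-- ===== PORT A =====
-- zip(*pl): yields the tuple of current heads until some iterator is exhausted (zip() yields nothing).
def pvZipStar (pl : List (List String)) : List (List String) :=
  if h : pl.isEmpty || pl.any (fun l => l.isEmpty) then []
  else (pl.map (fun l => l.headD "")) :: pvZipStar (pl.map (fun l => l.tail))
termination_by (pl.headD []).length
decreasing_by
  simp only [Bool.or_eq_true, List.isEmpty_iff, List.any_eq_true, not_or] at h
  obtain ⟨h1, h2⟩ := h
  cases pl with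
  | nil => exact absurd rfl h1
  | cons l t =>
    simp only [List.headD_cons]
    have hl : l ≠ [] := fun e => h2 ⟨l, by simp, by simp [e]⟩
    cases l with
    | nil => exact absurd rfl hl
    | cons x xs => simp

-- the 'for segments in zip(*parts_list): if len(set(segments)) == 1: append segments[0] else break' loop
def pvLoopA : List (List String) → List String
  | [] => []
  | segs :: rest =>
    if (PySem.Set.ofList segs).length = 1 then segs.headD "" :: pvLoopA rest
    else []

def common_prefix_parts_py (parts_list : List (List String)) : List String :=
  if parts_list.isEmpty then []
  else pvLoopA (pvZipStar parts_list)

-- ===== PORT B =====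
-- 'for x, y in zip(xs, ys): if x != y: break; res.append(x)'
def pvCommonTwo : List String → List String → List String
  | x :: xs, y :: ys => if x = y then x :: pvCommonTwo xs ys else []
  | _, _ => []

def common_prefix_parts_py_alt (parts_list : List (List String)) : List String :=
  match parts_list with
  | [] => []
  | h :: t => t.foldl pvCommonTwo h

-- ===== PRECONDITION & SPEC =====
def Spec_common_prefix_parts_py (parts_list : List (List String)) (out : List String) : Prop := out = common_prefix_parts_py_alt parts_list
instance (parts_list : List (List String)) (out : List String) : Decidable (Spec_common_prefix_parts_py parts_list out) := by unfold Spec_common_prefix_parts_py; infer_instance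

-- ===== CLAIM (what is proved, stated in full; the proofs are below) =====
def Claim_equal_common_prefix_parts_py : Prop := ∀ (parts_list : List (List String)), Dom_common_prefix_parts_py parts_list → Spec_common_prefix_parts_py parts_list (common_prefix_parts_py parts_list)

-- ===== LEMMAS AND PROOFS =====

-- set of a list with duplicated head
theorem pv_ofList_dup (x : String) (L : List String) :
    PySem.Set.ofList (x :: x :: L) = PySem.Set.ofList (x :: L) := by
  simp [PySem.Set.ofList_eq_foldl, PySem.Set.add]

-- two distinct members force set size ≠ 1
theorem pv_ofList_two_ne (x y : String) (L : List String) (hxy : x ≠ y) :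
    (PySem.Set.ofList (x :: y :: L)).length ≠ 1 := by
  intro hlen
  have hx : x ∈ PySem.Set.ofList (x :: y :: L) := by
    rw [PySem.Set.mem_ofList]; simp
  have hy : y ∈ PySem.Set.ofList (x :: y :: L) := by
    rw [PySem.Set.mem_ofList]; simp
  obtain ⟨z, hz⟩ := List.length_eq_one_iff.mp hlen
  rw [hz] at hx hy
  simp at hx hy
  exact hxy (hx.trans hy.symm)

-- single-list zip: A's loop returns the list itself
theorem pv_loopA_single (h : List String) : pvLoopA (pvZipStar [h]) = h := by
  induction h with
  | nil => rw [pvZipStar]; simp [pvLoopA]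
  | cons x h' ih =>
    rw [pvZipStar]
    simp [pvLoopA, PySem.Set.ofList, PySem.Set.add, ih]

-- key lemma: folding one more list into the prefix commutes with the columnar scan
theorem pv_key (h : List String) : ∀ (a : List String) (t : List (List String)),
    pvLoopA (pvZipStar (pvCommonTwo h a :: t)) = pvLoopA (pvZipStar (h :: a :: t)) := by
  induction h with
  | nil =>
    intro a t
    have hc : pvCommonTwo [] a = [] := by cases a <;> rfl
    rw [hc]
    conv_lhs => rw [pvZipStar]
    conv_rhs => rw [pvZipStar]
    simp [pvLoopA]
  | cons x h' ih =>
    intro a t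
    cases a with
    | nil =>
      have hc : pvCommonTwo (x :: h') [] = [] := rfl
      rw [hc]
      conv_lhs => rw [pvZipStar]
      conv_rhs => rw [pvZipStar]
      simp [pvLoopA]
    | cons y a' =>
      rw [pvCommonTwo]
      by_cases hxy : x = y
      · subst hxy
        rw [if_pos rfl]
        by_cases hemp : t.any (fun l => l.isEmpty)
        · conv_lhs => rw [pvZipStar]
          conv_rhs => rw [pvZipStar]
          simp [hemp, pvLoopA]
        · conv_lhs => rw [pvZipStar]
          conv_rhs => rw [pvZipStar]
          simp only [List.isEmpty_cons, List.any_cons, List.isEmpty_cons, hemp, Bool.or_false]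
          simp only [dite_false, Bool.false_eq_true, List.map_cons, List.headD_cons,
            List.tail_cons]
          simp only [pvLoopA]
          rw [pv_ofList_dup]
          by_cases hc : (PySem.Set.ofList (x :: t.map (fun l => l.headD ""))).length = 1
          · simp only [if_pos hc, List.headD_cons]
            rw [ih a' (t.map (fun l => l.tail))]
          · simp only [if_neg hc]
      · simp only [if_neg hxy]
        conv_lhs => rw [pvZipStar]
        by_cases hemp : t.any (fun l => l.isEmpty)
        · conv_rhs => rw [pvZipStar]
          simp [hemp, pvLoopA]
        · conv_rhs => rw [pvZipStar]
          simp only [List.isEmpty_cons, List.any_cons, List.isEmpty_cons, Bool.false_or,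
            hemp, Bool.or_false]
          simp only [dite_false, Bool.false_eq_true, List.map_cons, List.headD_cons,
            List.tail_cons]
          simp only [pvLoopA]
          rw [if_neg (pv_ofList_two_ne x y _ hxy)]
          simp [pvLoopA]

theorem pv_fold_eq (t : List (List String)) : ∀ (h : List String),
    t.foldl pvCommonTwo h = pvLoopA (pvZipStar (h :: t)) := by
  induction t with
  | nil => intro h; simp [List.foldl, pv_loopA_single]
  | cons a t' ih =>
    intro h
    rw [List.foldl_cons, ih (pvCommonTwo h a), pv_key]

-- ===== VERDICT (by name: the statement is the Claim_ definition above) =====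
theorem common_prefix_parts_py_spec : Claim_equal_common_prefix_parts_py := by
  intro parts_list _
  unfold Spec_common_prefix_parts_py common_prefix_parts_py common_prefix_parts_py_alt
  cases parts_list with
  | nil => simp
  | cons h t => simp [pv_fold_eq]
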